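-- pv_equiv track=rewrite | github.com/oagueda/The-Witch | Código/TheWitch/TheWitchUsuarios.py | normalizeapellidos
-- ===== SOURCE A (Python) =====
-- def normalizeapellidos(s):
--     replacements = (
--         ("[", ""),
--         ("]", " "),
--         ("'", ""),
--         (",", ""),
--     )
--     for a, b in replacements:
--         s = s.replace(a, b).replace(a.upper(), b.upper())
--     return s
-- ===== SOURCE B (Python) =====
-- def normalizeapellidos(s):
--     table = str.maketrans({"[": None, "]": " ", "'": None, ",": None})
--     return s.translate(table)
-- ===== Notes on version B (the rewrite author's own statement) =====
-- stated objective: idiomatic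
-- what changed: Replaces A's four sequential whole-string replace passes (each doubled with a no-op upper-case variant) by one character-by-character pass driven by a translation table (str.translate) that deletes three of the characters and maps the fourth to a space.
import Mathlib
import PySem

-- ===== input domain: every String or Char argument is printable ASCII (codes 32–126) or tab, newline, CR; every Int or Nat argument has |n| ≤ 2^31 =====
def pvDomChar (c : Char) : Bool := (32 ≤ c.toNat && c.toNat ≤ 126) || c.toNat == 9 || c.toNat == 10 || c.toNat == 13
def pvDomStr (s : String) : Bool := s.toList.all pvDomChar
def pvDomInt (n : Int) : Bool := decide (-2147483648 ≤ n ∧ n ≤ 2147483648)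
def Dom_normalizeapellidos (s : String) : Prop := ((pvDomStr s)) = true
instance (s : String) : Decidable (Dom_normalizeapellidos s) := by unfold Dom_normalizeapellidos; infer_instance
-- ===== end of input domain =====

-- B replaces A's four sequential whole-string replace passes (each doubled with a
-- no-op .upper() variant) by one table-driven character-by-character pass (translate).


-- ===== PORT A =====
-- literal transliteration: the tuple of replacements, folded left; each step does
-- s.replace(a, b).replace(a.upper(), b.upper())
def normalizeapellidos (s : String) : String :=
  let replacements : List (String × String) := [("[", ""), ("]", " "), ("'", ""), (",", "")]
  replacements.foldl
    (fun s ab =>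
      PySem.Str.replace (PySem.Str.replace s ab.1 ab.2)
        (PySem.Str.upper ab.1) (PySem.Str.upper ab.2)) s

-- ===== PORT B =====
-- translation table of Source B: '[' ↦ delete, ']' ↦ ' ', '\'' ↦ delete, ',' ↦ delete
def pvTable (c : Char) : Option Char :=
  if c = '[' then none
  else if c = ']' then some ' '
  else if c = '\'' then none
  else if c = ',' then none
  else some c

-- s.translate(table): one pass, each char looked up in the table
def normalizeapellidos_alt (s : String) : String :=
  String.ofList (s.toList.filterMap pvTable)

-- ===== PRECONDITION & SPEC =====
def Spec_normalizeapellidos (s : String) (out : String) : Prop := out = normalizeapellidos_alt s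
instance (s : String) (out : String) : Decidable (Spec_normalizeapellidos s out) := by unfold Spec_normalizeapellidos; infer_instance

-- ===== CLAIM (what is proved, stated in full; the proofs are below) =====
def Claim_equal_normalizeapellidos : Prop := ∀ (s : String), Dom_normalizeapellidos s → Spec_normalizeapellidos s (normalizeapellidos s)

-- ===== LEMMAS AND PROOFS =====

-- single-char replace.go characterised as a flatMap
theorem replace_go_single (o : Char) (new : List Char) :
    ∀ (s : List Char) (fuel : Nat) (acc : List Char), s.length ≤ fuel →
      PySem.Chars.replace.go [o] new fuel s acc
        = acc.reverse ++ s.flatMap (fun c => if c = o then new else [c]) := by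
  intro s
  induction s with
  | nil =>
      intro fuel acc _
      cases fuel <;> simp [PySem.Chars.replace.go]
  | cons c t ih =>
      intro fuel acc h
      cases fuel with
      | zero => simp at h
      | succ n =>
        simp only [PySem.Chars.replace.go]
        by_cases hc : c = o
        · subst hc
          have : List.isPrefixOf [c] (c :: t) = true := by
            simp [List.isPrefixOf]
          rw [this]
          rw [show List.drop (List.length [c]) (c :: t) = t by simp]
          rw [ih n (new.reverse ++ acc) (by simpa using h)]
          simp
        · have : List.isPrefixOf [o] (c :: t) = true ↔ False := by
            simp [List.isPrefixOf]; exact fun h' => hc h'.symm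
          rw [if_neg (by simp [List.isPrefixOf]; exact fun h' => hc h'.symm)]
          rw [ih n (c :: acc) (by simpa using h)]
          simp [hc]

theorem replace_single (s : List Char) (o : Char) (new : List Char) :
    PySem.Chars.replace s [o] new
      = s.flatMap (fun c => if c = o then new else [c]) := by
  unfold PySem.Chars.replace
  rw [if_neg (by simp)]
  exact replace_go_single o new s s.length [] (le_refl _)

-- the eight chained single-char replaces collapse to B's single filterMap pass
theorem chain_eq (l : List Char) :
    (((((((l.flatMap (fun c => if c = '[' then [] else [c])).flatMap
        (fun c => if c = '[' then [] else [c])).flatMap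
        (fun c => if c = ']' then [' '] else [c])).flatMap
        (fun c => if c = ']' then [' '] else [c])).flatMap
        (fun c => if c = '\'' then [] else [c])).flatMap
        (fun c => if c = '\'' then [] else [c])).flatMap
        (fun c => if c = ',' then [] else [c])).flatMap
        (fun c => if c = ',' then [] else [c])
      = l.filterMap pvTable := by
  induction l with
  | nil => simp
  | cons c t ih =>
      by_cases h1 : c = '['
      · subst h1; simp [pvTable, List.flatMap_cons, ih]
      · by_cases h2 : c = ']'
        · subst h2; simp [pvTable, List.flatMap_cons, ih]
        · by_cases h3 : c = '\''
          · subst h3; simp [pvTable, List.flatMap_cons, ih]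
          · by_cases h4 : c = ','
            · subst h4; simp [pvTable, List.flatMap_cons, ih]
            · simp [pvTable, h1, h2, h3, h4, List.flatMap_cons, ih]

-- ===== VERDICT (by name: the statement is the Claim_ definition above) =====
theorem normalizeapellidos_spec : Claim_equal_normalizeapellidos := by
  intro s _
  unfold Spec_normalizeapellidos normalizeapellidos normalizeapellidos_alt
  simp only [List.foldl]
  have hu1 : PySem.Str.upper "[" = "[" := by decide
  have hu2 : PySem.Str.upper "]" = "]" := by decide
  have hu3 : PySem.Str.upper "'" = "'" := by decide
  have hu4 : PySem.Str.upper "," = "," := by decide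
  have hu5 : PySem.Str.upper "" = "" := by decide
  have hu6 : PySem.Str.upper " " = " " := by decide
  rw [hu1, hu2, hu3, hu4, hu5, hu6]
  simp only [PySem.Str.replace, String.toList_ofList]
  rw [show ("[" : String).toList = ['['] from rfl,
      show ("]" : String).toList = [']'] from rfl,
      show ("'" : String).toList = ['\''] from rfl,
      show ("," : String).toList = [','] from rfl,
      show ("" : String).toList = [] from rfl,
      show (" " : String).toList = [' '] from rfl]
  simp only [replace_single]
  rw [chain_eq]
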